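-- pv_equiv track=rewrite | github.com/polycyber/PolyPwnCTF-2025-Challenges | AI/Etude de Popcorn/src/points_generator.py | split_phrase
-- ===== SOURCE A (Python) =====
-- def split_phrase(phrase, nb_clusters):
--     length = len(phrase)
--     part_size = length // nb_clusters
--     parts = []
--     for i in range(nb_clusters):
--         start_index = i * part_size
--         if i != nb_clusters - 1:
--             end_index = (i + 1) * part_size
--         else:
--             end_index = length
--         parts.append(phrase[start_index:end_index])
--     return parts
-- ===== SOURCE B (Python) =====
-- def split_phrase(phrase, nb_clusters):
--     part_size = len(phrase) // nb_clusters
--     parts = []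
--     rest = phrase
--     k = nb_clusters
--     while k > 1:
--         parts.append(rest[:part_size])
--         rest = rest[part_size:]
--         k -= 1
--     if k == 1:
--         parts.append(rest)
--     return parts
-- ===== Notes on version B (the rewrite author's own statement) =====
-- stated objective: alternative
-- what changed: B drops A's index arithmetic (start/end positions computed from the loop counter with a last-cluster conditional) and instead consumes the string itself: a while loop strips the next part_size characters off the front of the remaining string while more than one cluster is left, then appends the whole remainder as the final cluster.
import Mathlib
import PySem

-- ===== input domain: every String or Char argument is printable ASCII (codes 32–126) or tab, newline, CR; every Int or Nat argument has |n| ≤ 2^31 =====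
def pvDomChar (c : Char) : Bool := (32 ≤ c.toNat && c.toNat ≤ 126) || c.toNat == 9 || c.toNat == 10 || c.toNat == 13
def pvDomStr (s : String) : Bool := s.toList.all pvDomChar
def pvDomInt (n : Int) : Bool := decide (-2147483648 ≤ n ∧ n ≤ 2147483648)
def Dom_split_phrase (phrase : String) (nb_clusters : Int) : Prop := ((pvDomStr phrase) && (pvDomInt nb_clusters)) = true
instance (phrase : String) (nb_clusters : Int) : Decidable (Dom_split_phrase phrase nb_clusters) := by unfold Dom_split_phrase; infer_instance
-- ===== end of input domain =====

-- B replaces A's index arithmetic (start/end positions computed from the loop counter, with a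
-- conditional special-casing the last cluster) by consuming the string itself: while more than one
-- cluster remains, strip the next part_size characters off the front; the final cluster is the rest.

-- ===== PORT A =====
def split_phrase (phrase : String) (nb_clusters : Int) : List String :=
  let length : Int := PySem.Str.len phrase
  let part_size : Int := PySem.Int.floordiv length nb_clusters
  (PySem.List.pyRange 0 nb_clusters 1).foldl
    (fun parts i =>
      let start_index := i * part_size
      let end_index := if i ≠ nb_clusters - 1 then (i + 1) * part_size else length
      parts ++ [PySem.Str.slice phrase (some start_index) (some end_index)]) []

-- ===== PORT B =====
-- Source B's while loop: consume the remaining string, appending the stripped front each round.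
def splitGo (part_size : Int) (parts : List String) (rest : String) (k : Int) : List String :=
  if _h0 : 1 < k then
    splitGo part_size (parts ++ [PySem.Str.slice rest none (some part_size)])
      (PySem.Str.slice rest (some part_size) none) (k - 1)
  else if k = 1 then parts ++ [rest] else parts
termination_by k.toNat
decreasing_by omega

def split_phrase_alt (phrase : String) (nb_clusters : Int) : List String :=
  let part_size : Int := PySem.Int.floordiv (PySem.Str.len phrase) nb_clusters
  splitGo part_size [] phrase nb_clusters

-- ===== PRECONDITION & SPEC =====
-- Python's '//' raises ZeroDivisionError when nb_clusters = 0 (in A and in B); only that input is excluded.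
def Pre_split_phrase (phrase : String) (nb_clusters : Int) : Prop := nb_clusters ≠ 0
instance (phrase : String) (nb_clusters : Int) : Decidable (Pre_split_phrase phrase nb_clusters) := by unfold Pre_split_phrase; infer_instance
def pvWitness_split_phrase : String × Int := ("hello world", 3)

def Spec_split_phrase (phrase : String) (nb_clusters : Int) (out : List String) : Prop := out = split_phrase_alt phrase nb_clusters
instance (phrase : String) (nb_clusters : Int) (out : List String) : Decidable (Spec_split_phrase phrase nb_clusters out) := by unfold Spec_split_phrase; infer_instance

-- ===== CLAIM (what is proved, stated in full; the proofs are below) =====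
def Claim_equal_split_phrase : Prop := ∀ (phrase : String) (nb_clusters : Int), Dom_split_phrase phrase nb_clusters → Pre_split_phrase phrase nb_clusters → Spec_split_phrase phrase nb_clusters (split_phrase phrase nb_clusters)

-- ===== LEMMAS AND PROOFS =====

-- A's append-fold is the map over the range.
theorem foldl_append_singleton {α β : Type} (f : α → β) :
    ∀ (xs : List α) (acc : List β),
      xs.foldl (fun ps i => ps ++ [f i]) acc = acc ++ xs.map f := by
  intro xs
  induction xs with
  | nil => simp
  | cons x xs ih => intro acc; simp [List.foldl, ih]

-- B's recursive stripping, started at cluster index a with the suffix from a*p, produces exactly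
-- A's indexed slices for indices a..n-1 (the last one taking the whole remainder).
theorem go_eq (phrase : String) (p : Int) (hp : 0 ≤ p) (n : Int) :
    ∀ (k : Nat) (a : Int) (rest : String) (acc : List String), 0 ≤ a → (n - a).toNat = k →
      rest.toList = phrase.toList.drop (a * p).toNat →
      splitGo p acc rest (n - a) = acc ++
      (PySem.List.pyRange a n 1).map (fun i =>
        PySem.Str.slice phrase (some (i * p))
          (some (if i ≠ n - 1 then (i + 1) * p else (phrase.toList.length : Int)))) := by
  intro k
  induction k with
  | zero =>
      intro a rest acc ha hk hr
      have h : n ≤ a := by omega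
      have h0 : ¬ (1 < n - a) := by omega
      have h1 : n - a ≠ 1 := by omega
      rw [PySem.List.pyRange_one_eq_nil h, splitGo]
      simp [h0, h1]
  | succ k ih =>
      intro a rest acc ha hk hr
      have hlt : a < n := by omega
      have hap : 0 ≤ a * p := mul_nonneg ha hp
      have hap1 : 0 ≤ (a + 1) * p := mul_nonneg (by omega) hp
      have hdist : (a + 1) * p = a * p + p := by ring
      rw [PySem.List.pyRange_one_cons hlt]
      by_cases h2 : a + 1 < n
      · -- not the last cluster: strip the head, recurse on the tail
        have hne : a ≠ n - 1 := by omega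
        have hk0 : 1 < n - a := by omega
        rw [splitGo]
        simp only [dif_pos hk0, List.map_cons, if_pos hne]
        have hhead : PySem.Str.slice rest none (some p) =
            PySem.Str.slice phrase (some (a * p)) (some ((a + 1) * p)) := by
          apply String.toList_inj.mp
          rw [PySem.Str.toList_slice, PySem.Str.toList_slice]
          simp only [PySem.Chars.slice_eq_listSlice]
          rw [PySem.List.slice_to rest.toList hp,
              PySem.List.slice_toNat phrase.toList hap hap1, hr]
          have hnat : ((a + 1) * p).toNat - (a * p).toNat = p.toNat := by
            rw [hdist]; omega
          rw [hnat]
        have htail := ih (a + 1) (PySem.Str.slice rest (some p) none)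
          (acc ++ [PySem.Str.slice phrase (some (a * p)) (some ((a + 1) * p))])
          (by omega) (by omega)
          (by
            rw [PySem.Str.toList_slice]
            simp only [PySem.Chars.slice_eq_listSlice]
            rw [PySem.List.slice_from rest.toList hp, hr, List.drop_drop]
            have : (a * p).toNat + p.toNat = ((a + 1) * p).toNat := by
              rw [hdist]; omega
            rw [this])
        have harg : n - a - 1 = n - (a + 1) := by ring
        rw [hhead, harg, htail, List.append_assoc]
        rfl
      · -- last cluster: the remainder is exactly phrase[a*p : length]
        have heq : a = n - 1 := by omega
        have h1 : n - a = 1 := by omega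
        have hnext : n ≤ a + 1 := by omega
        have hk0 : ¬ (1 < n - a) := by omega
        rw [splitGo, PySem.List.pyRange_one_eq_nil hnext]
        simp only [h1, List.map_cons, List.map_nil, if_neg (by omega : ¬ a ≠ n - 1)]
        have hrest : rest = PySem.Str.slice phrase (some (a * p)) (some (phrase.toList.length : Int)) := by
          apply String.toList_inj.mp
          rw [PySem.Str.toList_slice]
          simp only [PySem.Chars.slice_eq_listSlice]
          rw [PySem.List.slice_toNat phrase.toList hap (by positivity), hr]
          rw [List.take_of_length_le]
          simp only [List.length_drop, Int.toNat_natCast]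
          omega
        simp [hrest]

-- ===== VERDICT (by name: the statement is the Claim_ definition above) =====
theorem split_phrase_spec : Claim_equal_split_phrase := by
  intro phrase n _ hn
  unfold Spec_split_phrase split_phrase split_phrase_alt
  rw [foldl_append_singleton]
  by_cases hpos : 0 < n
  · have hp : 0 ≤ PySem.Int.floordiv (PySem.Str.len phrase) n := by
      apply Int.fdiv_nonneg _ (by omega)
      simp [PySem.Str.len_eq]
    have h := go_eq phrase (PySem.Int.floordiv (PySem.Str.len phrase) n) hp n n.toNat 0 phrase []
      le_rfl (by omega) (by simp)
    rw [sub_zero] at h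
    simp only [List.nil_append, PySem.Str.len_eq]
    exact h.symm
  · have hle : n ≤ 0 := by omega
    rw [PySem.List.pyRange_one_eq_nil hle, splitGo]
    simp [show ¬ (1 < n) by omega, show n ≠ 1 by omega]
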